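-- pv_equiv track=rewrite | github.com/mmcintyre1/advent_of_code_2019_python | 04/part_2.py | password_check_2
-- ===== SOURCE A (Python) =====
-- def password_check_2(pw):
--     prev = ""
--     ascending = True
--     double_check = False
--     repeats = 0
--
--     for c in str(pw):
--         if c == prev:
--             repeats += 1
--         else:
--             if repeats == 1:
--                 double_check = True
--             repeats = 0
--
--         if prev:
--             if int(c) < int(prev):
--                 ascending = False
--
--         prev = c
--
--     # handle numbers that end on duplicate
--     if repeats == 1:
--         double_check = True
--
--     return ascending and double_check
-- ===== SOURCE B (Python) =====
-- from itertools import groupby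
--
-- def password_check_2(pw):
--     s = str(pw)
--     ascending = all(a <= b for a, b in zip(s, s[1:]))
--     has_double = any(sum(1 for _ in g) == 2 for _, g in groupby(s))
--     return ascending and has_double
-- ===== Notes on version B (the rewrite author's own statement) =====
-- stated objective: simpler
-- what changed: A's single loop with a running prev/repeats/ascending/double state is replaced by two independent passes: a pairwise char-comparison for ascending and an itertools.groupby run-length scan for the exact double.
-- crash fix: On negative pw A raises ValueError at int('-') on the sign character; B compares characters directly and returns the plain verdict (e.g. False for -5). — e.g. on password_check_2(-5): A raises ValueError, B returns false
import Mathlib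
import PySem

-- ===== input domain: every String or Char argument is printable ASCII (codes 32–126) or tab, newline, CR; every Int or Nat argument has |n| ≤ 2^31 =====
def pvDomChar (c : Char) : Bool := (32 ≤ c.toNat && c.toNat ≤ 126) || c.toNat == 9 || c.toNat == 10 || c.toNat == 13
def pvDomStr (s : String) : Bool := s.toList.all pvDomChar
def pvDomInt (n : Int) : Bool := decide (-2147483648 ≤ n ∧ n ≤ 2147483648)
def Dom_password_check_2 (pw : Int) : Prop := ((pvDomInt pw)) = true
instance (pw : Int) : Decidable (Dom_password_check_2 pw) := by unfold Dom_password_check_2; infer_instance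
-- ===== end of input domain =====

-- B replaces A's single running-counter loop by two independent passes (a pairwise
-- ascending check and a run-length/groupby scan for an exact double); objective: simpler.

-- ===== PORT A =====
-- state = (prev, ascending, double_check, repeats); Python's prev is the string "" or a
-- single-char string: modelled as Option Char (none = "").  int(c) is PySem.Int.ofChars? [c];
-- its `.getD 0` is only reached outside Pre_ (non-digit chars, where Python raises ValueError).
def pvStepA (st : Option Char × Bool × Bool × Int) (c : Char) : Option Char × Bool × Bool × Int :=
  match st with
  | (prev, asc, dc, rep) =>
    let dr : Bool × Int :=
      if some c == prev then (dc, rep + 1)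
      else (if rep == 1 then true else dc, 0)
    let asc' : Bool :=
      match prev with
      | some p =>
          if (PySem.Int.ofChars? [c]).getD 0 < (PySem.Int.ofChars? [p]).getD 0 then false else asc
      | none => asc
    (some c, asc', dr.1, dr.2)

def password_check_2 (pw : Int) : Bool :=
  let st := (PySem.Int.toChars pw).foldl pvStepA (none, true, false, 0)
  st.2.1 && (if st.2.2.2 == 1 then true else st.2.2.1)

-- ===== PORT B =====
-- all(a <= b for a, b in zip(s, s[1:]))
def pvAscPairs (l : List Char) : Bool :=
  (l.zip (l.drop 1)).all (fun p => decide (p.1 ≤ p.2))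

-- run lengths of itertools.groupby(s)
def pvRlAux (c : Char) (n : Nat) : List Char → List Nat
  | [] => [n]
  | d :: t => if d == c then pvRlAux c (n + 1) t else n :: pvRlAux d 1 t

def pvRunLengths : List Char → List Nat
  | [] => []
  | c :: t => pvRlAux c 1 t

def password_check_2_alt (pw : Int) : Bool :=
  let l := PySem.Int.toChars pw
  pvAscPairs l && (pvRunLengths l).any (fun n => n == 2)

-- ===== PRECONDITION & SPEC =====
-- Pre_ excludes negative pw: there str(pw) starts with '-' and A raises ValueError at int('-').
def Pre_password_check_2 (pw : Int) : Prop := 0 ≤ pw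
instance (pw : Int) : Decidable (Pre_password_check_2 pw) := by unfold Pre_password_check_2; infer_instance
def pvWitness_password_check_2 : Int := (122345)

-- On negative pw A raises ValueError (int('-')); B returns the plain verdict on str(pw)'s characters.
def Raises_password_check_2 (pw : Int) : Prop := pw < 0
instance (pw : Int) : Decidable (Raises_password_check_2 pw) := by unfold Raises_password_check_2; infer_instance
def pvRaiseWitness_password_check_2 : Int := (-5)
def pvRaiseWitnessOut_password_check_2 : Bool := false

def Spec_password_check_2 (pw : Int) (out : Bool) : Prop := out = password_check_2_alt pw
instance (pw : Int) (out : Bool) : Decidable (Spec_password_check_2 pw out) := by unfold Spec_password_check_2; infer_instance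

-- ===== CLAIM (what is proved, stated in full; the proofs are below) =====
def Claim_equal_password_check_2 : Prop := ∀ (pw : Int), Dom_password_check_2 pw → Pre_password_check_2 pw → Spec_password_check_2 pw (password_check_2 pw)
def Claim_raises_password_check_2 : Prop := (∀ (pw : Int), Dom_password_check_2 pw → Raises_password_check_2 pw → ¬ Pre_password_check_2 pw) ∧ (Dom_password_check_2 (pvRaiseWitness_password_check_2) ∧ Raises_password_check_2 (pvRaiseWitness_password_check_2) ∧ password_check_2_alt (pvRaiseWitness_password_check_2) = pvRaiseWitnessOut_password_check_2)

-- ===== LEMMAS AND PROOFS =====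

def pvDigs : List Char := ['0','1','2','3','4','5','6','7','8','9']

-- A's final ascending value as a chain; A's double detection as a recursion on runs.
def pvAscChain (p : Char) : List Char → Bool
  | [] => true
  | c :: t => decide (p ≤ c) && pvAscChain c t

def pvDblFrom (p : Char) (r : Nat) : List Char → Bool
  | [] => r == 1
  | c :: t => if c == p then pvDblFrom p (r + 1) t else ((r == 1) || pvDblFrom c 0 t)

lemma pvDigitChar_mem (r : Nat) (h : r < 10) : Nat.digitChar r ∈ pvDigs := by
  interval_cases r <;> decide

lemma pvToDigitsCore_digits :
    ∀ (f n : Nat) (l : List Char), (∀ c ∈ l, c ∈ pvDigs) →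
      ∀ c ∈ Nat.toDigitsCore 10 f n l, c ∈ pvDigs := by
  intro f
  induction f with
  | zero => intro n l hl; simpa [Nat.toDigitsCore] using hl
  | succ f ih =>
    intro n l hl c hc
    simp only [Nat.toDigitsCore] at hc
    split at hc
    · rcases List.mem_cons.mp hc with h | h
      · exact h ▸ pvDigitChar_mem _ (Nat.mod_lt _ (by omega))
      · exact hl _ h
    · exact ih _ _ (by
        intro d hd
        rcases List.mem_cons.mp hd with h | h
        · exact h ▸ pvDigitChar_mem _ (Nat.mod_lt _ (by omega))
        · exact hl _ h) c hc

lemma pvToDigitsCore_ne_nil :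
    ∀ (f n : Nat) (l : List Char), l ≠ [] → Nat.toDigitsCore 10 f n l ≠ [] := by
  intro f
  induction f with
  | zero => intro n l hl; simpa [Nat.toDigitsCore] using hl
  | succ f ih =>
    intro n l hl
    simp only [Nat.toDigitsCore]
    split
    · simp
    · exact ih _ _ (by simp)

lemma pvToChars_digits (pw : Int) (h : 0 ≤ pw) : ∀ c ∈ PySem.Int.toChars pw, c ∈ pvDigs := by
  simp only [PySem.Int.toChars, if_neg (by omega : ¬ pw < 0)]
  exact pvToDigitsCore_digits _ _ _ (by simp)

lemma pvToChars_ne_nil (pw : Int) (h : 0 ≤ pw) : PySem.Int.toChars pw ≠ [] := by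
  simp only [PySem.Int.toChars, if_neg (by omega : ¬ pw < 0)]
  unfold Nat.toDigits
  simp only [Nat.toDigitsCore]
  split
  · simp
  · exact pvToDigitsCore_ne_nil _ _ _ (by simp)

lemma pvCmp_eq (c p : Char) (hc : c ∈ pvDigs) (hp : p ∈ pvDigs) :
    ((PySem.Int.ofChars? [c]).getD 0 < (PySem.Int.ofChars? [p]).getD 0) ↔ c < p := by
  fin_cases hc <;> fin_cases hp <;> decide

lemma pvBeqNatInt (r : Nat) : (((r : Int)) == 1) = (r == 1) := by
  rcases eq_or_ne r 1 with h | h <;> simp [h]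

def pvFinishA (st : Option Char × Bool × Bool × Int) : Bool :=
  st.2.1 && (if st.2.2.2 == 1 then true else st.2.2.1)

lemma pvMainA :
    ∀ (l : List Char), (∀ c ∈ l, c ∈ pvDigs) →
      ∀ (p : Char), p ∈ pvDigs → ∀ (asc dc : Bool) (r : Nat),
        pvFinishA (l.foldl pvStepA (some p, asc, dc, (r : Int)))
          = ((asc && pvAscChain p l) && (dc || pvDblFrom p r l)) := by
  intro l
  induction l with
  | nil =>
    intro _ p _ asc dc r
    simp only [List.foldl_nil, pvFinishA, pvAscChain, pvDblFrom, pvBeqNatInt r]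
    cases hr : (r == 1) <;> simp
  | cons c t ih =>
    intro hl p hp asc dc r
    have hc : c ∈ pvDigs := hl c (by simp)
    have ht : ∀ d ∈ t, d ∈ pvDigs := fun d hd => hl d (by simp [hd])
    simp only [List.foldl_cons]
    by_cases hcp : c = p
    · subst hcp
      have hstep : pvStepA (some c, asc, dc, (r : Int)) c = (some c, asc, dc, ((r + 1 : Nat) : Int)) := by
        simp only [pvStepA]
        rw [if_congr (pvCmp_eq c c hc hc) rfl rfl, if_neg (lt_irrefl c),
          if_pos (by simp : (some c == some c) = true)]
        simp only [Prod.mk.injEq, true_and]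
        push_cast
        ring
      rw [hstep, ih ht c hc asc dc (r + 1)]
      simp only [pvAscChain, pvDblFrom]
      simp [Bool.and_assoc]
    · have hstep : pvStepA (some p, asc, dc, (r : Int)) c
          = (some c, asc && !(decide (c < p)), dc || (r == 1), ((0 : Nat) : Int)) := by
        simp only [pvStepA, pvBeqNatInt r]
        rw [if_neg (by simp [hcp] : ¬ (some c == some p) = true),
          if_congr (pvCmp_eq c p hc hp) rfl rfl]
        simp only [Prod.mk.injEq, Nat.cast_zero, and_true, true_and]
        constructor
        · by_cases h : c < p <;> simp [h]
        · cases hr : (r == 1) <;> simp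
      rw [hstep, ih ht c hc _ _ 0]
      simp only [pvAscChain, pvDblFrom, if_neg (by simp [hcp] : ¬ (c == p) = true)]
      have hle : (!decide (c < p)) = decide (p ≤ c) := by
        by_cases h : c < p
        · simp [h, not_le.mpr h]
        · simp [h, not_lt.mp h]
      rw [hle]
      cases asc <;> cases dc <;> cases hpc : decide (p ≤ c) <;> simp_all

lemma pvAscPairs_cons : ∀ (t : List Char) (c : Char), pvAscPairs (c :: t) = pvAscChain c t := by
  intro t
  induction t with
  | nil => intro c; rfl
  | cons d t ih =>
    intro c
    have hd := ih d
    simp only [pvAscPairs, pvAscChain, List.drop_succ_cons, List.drop_zero, List.zip_cons_cons,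
      List.all_cons] at hd ⊢
    rw [hd]

lemma pvRlAny : ∀ (t : List Char) (c : Char) (r : Nat),
    (pvRlAux c (r + 1) t).any (fun n => n == 2) = pvDblFrom c r t := by
  intro t
  induction t with
  | nil =>
    intro c r
    simp only [pvRlAux, pvDblFrom, List.any_cons, List.any_nil, Bool.or_false]
    rcases eq_or_ne r 1 with h | h <;> simp [h]
  | cons d t ih =>
    intro c r
    simp only [pvRlAux, pvDblFrom]
    by_cases hdc : d = c
    · rw [if_pos (by simp [hdc]), if_pos (by simp [hdc])]
      exact ih c (r + 1)
    · rw [if_neg (by simp [hdc]), if_neg (by simp [hdc])]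
      simp only [List.any_cons]
      rw [ih d 0]
      rcases eq_or_ne r 1 with h | h <;> simp [h]

-- ===== VERDICT (by name: the statement is the Claim_ definition above) =====
theorem password_check_2_spec : Claim_equal_password_check_2 := by
  intro pw _ hpre
  unfold Spec_password_check_2 password_check_2 password_check_2_alt
  obtain ⟨c, t, hct⟩ : ∃ c t, PySem.Int.toChars pw = c :: t := by
    cases h : PySem.Int.toChars pw with
    | nil => exact absurd h (pvToChars_ne_nil pw hpre)
    | cons c t => exact ⟨c, t, rfl⟩
  have hdig := pvToChars_digits pw hpre
  rw [hct] at hdig ⊢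
  have hc : c ∈ pvDigs := hdig c (by simp)
  have ht : ∀ d ∈ t, d ∈ pvDigs := fun d hd => hdig d (by simp [hd])
  have hstep0 : pvStepA (none, true, false, 0) c = (some c, true, false, ((0 : Nat) : Int)) := by
    simp [pvStepA]
  have hmain := pvMainA t ht c hc true false 0
  simp only [pvFinishA] at hmain
  simp only [List.foldl_cons, hstep0, hmain, pvRunLengths, pvAscPairs_cons, pvRlAny t c 0]
  simp

@[simp] theorem password_check_2_raises : Claim_raises_password_check_2 := by
  unfold Claim_raises_password_check_2
  exact ⟨by intro pw _ hr; unfold Raises_password_check_2 at hr; unfold Pre_password_check_2; omega,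
    by decide⟩
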